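-- pv_equiv track=rewrite | github.com/partho-maple/coding-interview-gym | algoexpert.io/python/Min_Rewards.py | minRewards
-- ===== SOURCE A (Python) =====
-- def minRewards(score):
--     rewards = [1 for _ in score]
--     for i in range(1, len(score)):
--         j = i - 1
--         if score[i] > score[j]:
--             rewards[i] = rewards[j] + 1
--         else:
--             while j >=0 and score[j] > score[j + 1]:
--                 rewards[j] = max(rewards[j], rewards[j + 1] + 1)
--                 j -= 1
--     return sum(rewards)
-- ===== SOURCE B (Python) =====
-- def minRewards(score):
--     n = len(score)
--     rewards = [1] * n
--     for i in range(1, n):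
--         if score[i] > score[i - 1]:
--             rewards[i] = rewards[i - 1] + 1
--     for i in reversed(range(n - 1)):
--         if score[i] > score[i + 1]:
--             rewards[i] = max(rewards[i], rewards[i + 1] + 1)
--     return sum(rewards)
-- ===== Notes on version B (the rewrite author's own statement) =====
-- stated objective: faster
-- what changed: Replaces A's quadratic backward fix-up while-loop (re-walking decreasing runs on every step) by the classic two staged linear passes: a left-to-right pass for increasing runs and a right-to-left max pass for decreasing runs.
import Mathlib
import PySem

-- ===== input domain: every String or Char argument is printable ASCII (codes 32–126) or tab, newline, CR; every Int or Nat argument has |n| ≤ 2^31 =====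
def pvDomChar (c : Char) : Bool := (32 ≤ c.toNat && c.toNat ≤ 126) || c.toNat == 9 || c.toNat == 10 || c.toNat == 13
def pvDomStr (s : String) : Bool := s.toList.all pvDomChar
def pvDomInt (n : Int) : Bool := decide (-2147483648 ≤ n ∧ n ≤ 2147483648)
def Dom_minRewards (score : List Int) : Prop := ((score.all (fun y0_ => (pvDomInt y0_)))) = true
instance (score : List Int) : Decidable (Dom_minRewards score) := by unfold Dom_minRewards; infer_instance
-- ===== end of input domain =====

-- B replaces A's quadratic backward fix-up while-loop by two staged linear passes.
-- All list indexing in both programs is provably in range, so it is ported exactly with getD.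

-- ===== PORT A =====
-- A's inner while loop: j runs i-1, i-2, … while j >= 0 and score[j] > score[j+1];
-- the Nat argument is j+1, so 0 encodes j = -1 (loop exit).
def aInner (s : List Int) : Nat → List Int → List Int
  | 0, r => r
  | j+1, r =>
    if s.getD j 0 > s.getD (j+1) 0 then
      aInner s j (r.set j (max (r.getD j 0) (r.getD (j+1) 0 + 1)))
    else r

-- one iteration of A's for-loop body
def aStep (s : List Int) (r : List Int) (i : Nat) : List Int :=
  if s.getD i 0 > s.getD (i-1) 0 then r.set i (r.getD (i-1) 0 + 1)
  else aInner s i r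

def minRewards (score : List Int) : Int :=
  ((List.range' 1 (score.length - 1)).foldl (aStep score)
    (List.replicate score.length 1)).sum

-- ===== PORT B =====
-- first pass: left to right, increasing runs
def bUpStep (s : List Int) (r : List Int) (i : Nat) : List Int :=
  if s.getD i 0 > s.getD (i-1) 0 then r.set i (r.getD (i-1) 0 + 1) else r

-- second pass: right to left, decreasing runs, taking max
def bDownStep (s : List Int) (r : List Int) (i : Nat) : List Int :=
  if s.getD i 0 > s.getD (i+1) 0 then r.set i (max (r.getD i 0) (r.getD (i+1) 0 + 1)) else r

def minRewards_alt (score : List Int) : Int :=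
  let n := score.length
  let r1 := (List.range' 1 (n-1)).foldl (bUpStep score) (List.replicate n 1)
  let r2 := ((List.range (n-1)).reverse).foldl (bDownStep score) r1
  r2.sum

-- ===== PRECONDITION & SPEC =====
def Spec_minRewards (score : List Int) (out : Int) : Prop := out = minRewards_alt score
instance (score : List Int) (out : Int) : Decidable (Spec_minRewards score out) := by unfold Spec_minRewards; infer_instance

-- ===== CLAIM (what is proved, stated in full; the proofs are below) =====
def Claim_equal_minRewards : Prop := ∀ (score : List Int), Dom_minRewards score → Spec_minRewards score (minRewards score)

-- ===== LEMMAS AND PROOFS =====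

-- length of the strictly increasing run ending at k
def upRun (s : List Int) : Nat → Int
  | 0 => 1
  | k+1 => if s.getD (k+1) 0 > s.getD k 0 then upRun s k + 1 else 1

-- length of the strictly decreasing run starting at k, looking no further than index m
def downTo (s : List Int) (m : Nat) (k : Nat) : Int :=
  if h : k < m ∧ s.getD k 0 > s.getD (k+1) 0 then downTo s m (k+1) + 1 else 1
termination_by m - k
decreasing_by omega

lemma one_le_upRun (s : List Int) (k : Nat) : 1 ≤ upRun s k := by
  cases k with
  | zero => simp [upRun]
  | succ k =>
    simp only [upRun]
    split
    · have := one_le_upRun s k; omega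
    · omega

lemma one_le_downTo (s : List Int) (m k : Nat) : 1 ≤ downTo s m k := by
  rw [downTo]
  split
  · have := one_le_downTo s m (k+1); omega
  · omega
termination_by m - k
decreasing_by omega

lemma downTo_step (s : List Int) (m k : Nat) (hk : k < m) (hs : s.getD k 0 > s.getD (k+1) 0) :
    downTo s m k = downTo s m (k+1) + 1 := by
  rw [downTo, dif_pos ⟨hk, hs⟩]

lemma downTo_stop (s : List Int) (m k : Nat) (h : ¬ (k < m ∧ s.getD k 0 > s.getD (k+1) 0)) :
    downTo s m k = 1 := by
  rw [downTo, dif_neg h]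

lemma downTo_mono (s : List Int) (m1 m2 k : Nat) (h : m1 ≤ m2) :
    downTo s m1 k ≤ downTo s m2 k := by
  by_cases hc : k < m1 ∧ s.getD k 0 > s.getD (k+1) 0
  · obtain ⟨hk, hs⟩ := hc
    rw [downTo_step s m1 k hk hs, downTo_step s m2 k (by omega) hs]
    have := downTo_mono s m1 m2 (k+1) h
    omega
  · rw [downTo_stop s m1 k hc]
    exact one_le_downTo s m2 k
termination_by m2 - k
decreasing_by omega

-- chain break: if the decreasing chain is broken at j, the bound beyond j is irrelevant
lemma downTo_break (s : List Int) (j : Nat) (hbr : ¬ s.getD j 0 > s.getD (j+1) 0) :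
    ∀ d k, k ≤ j → j - k ≤ d → ∀ m1 m2, j ≤ m1 → j ≤ m2 →
      downTo s m1 k = downTo s m2 k := by
  intro d
  induction d with
  | zero =>
    intro k hkj hd m1 m2 _ _
    have hk : k = j := by omega
    subst hk
    rw [downTo_stop s m1 k (fun h => hbr h.2), downTo_stop s m2 k (fun h => hbr h.2)]
  | succ d ih =>
    intro k hkj hd m1 m2 h1 h2
    rcases Nat.eq_or_lt_of_le hkj with heq | hlt
    · subst heq
      rw [downTo_stop s m1 k (fun h => hbr h.2), downTo_stop s m2 k (fun h => hbr h.2)]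
    · by_cases hc : s.getD k 0 > s.getD (k+1) 0
      · rw [downTo_step s m1 k (by omega) hc, downTo_step s m2 k (by omega) hc,
          ih (k+1) (by omega) (by omega) m1 m2 h1 h2]
      · rw [downTo_stop s m1 k (fun h => hc h.2), downTo_stop s m2 k (fun h => hc h.2)]

-- getD after set
lemma getD_set_self (r : List Int) (j : Nat) (v : Int) (h : j < r.length) :
    (r.set j v).getD j 0 = v := by
  simp [List.getD_eq_getElem?_getD, h]

lemma getD_set_ne (r : List Int) (j k : Nat) (v : Int) (h : j ≠ k) :
    (r.set j v).getD k 0 = r.getD k 0 := by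
  simp [List.getD_eq_getElem?_getD, h]

-- invariant of A's inner while loop
lemma aInner_inv (s : List Int) (i : Nat) (hin : i < s.length) :
    ∀ jp1 r, jp1 ≤ i → r.length = s.length →
    (∀ k, k < s.length → r.getD k 0 =
      if k < jp1 then max (upRun s k) (downTo s (i-1) k)
      else if k ≤ i then max (upRun s k) (downTo s i k) else 1) →
    (aInner s jp1 r).length = s.length ∧
    (∀ k, k < s.length → (aInner s jp1 r).getD k 0 =
      if k ≤ i then max (upRun s k) (downTo s i k) else 1) := by
  intro jp1
  induction jp1 with
  | zero =>
    intro r _ hlen hr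
    refine ⟨hlen, fun k hk => ?_⟩
    have := hr k hk
    simpa using this
  | succ j ih =>
    intro r hji hlen hr
    simp only [aInner]
    by_cases hc : s.getD j 0 > s.getD (j+1) 0
    · rw [if_pos hc]
      apply ih
      · omega
      · rw [List.length_set]; exact hlen
      · intro k hk
        by_cases hkj : k = j
        · subst hkj
          rw [getD_set_self _ _ _ (by omega)]
          have e1 : r.getD k 0 = max (upRun s k) (downTo s (i-1) k) := by
            have := hr k hk
            simpa [show k < k+1 by omega] using this
          have e2 : r.getD (k+1) 0 = max (upRun s (k+1)) (downTo s i (k+1)) := by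
            have := hr (k+1) (by omega)
            simpa [show ¬ (k+1 < k+1) by omega, show k+1 ≤ i by omega] using this
          have hup1 : upRun s (k+1) = 1 := by
            rw [upRun, if_neg (by omega)]
          have hstep : downTo s i k = downTo s i (k+1) + 1 :=
            downTo_step s i k (by omega) hc
          have hmono : downTo s (i-1) k ≤ downTo s i k :=
            downTo_mono s (i-1) i k (by omega)
          have hd1 : 1 ≤ downTo s i (k+1) := one_le_downTo s i (k+1)
          rw [e1, e2, hup1, if_neg (by omega : ¬ k < k), if_pos (by omega : k ≤ i)]
          omega
        · rw [getD_set_ne _ _ _ _ (fun h => hkj h.symm)]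
          have := hr k hk
          by_cases hkj2 : k < j
          · simpa [show k < j+1 by omega, hkj2] using this
          · simpa [show ¬ k < j+1 by omega, hkj2] using this
    · rw [if_neg hc]
      refine ⟨hlen, fun k hk => ?_⟩
      have := hr k hk
      by_cases hkj : k ≤ j
      · have heq : downTo s (i-1) k = downTo s i k :=
          downTo_break s j hc (j - k) k hkj (le_refl _) (i-1) i (by omega) (by omega)
        simp only [show k < j+1 by omega, if_pos] at this
        rw [this, heq, if_pos (by omega : k ≤ i)]
      · simpa [show ¬ k < j+1 by omega] using this

-- invariant of A's outer for loop
lemma aLoop_inv (s : List Int) (m : Nat) (hm : m ≤ s.length - 1) :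
    ((List.range' 1 m).foldl (aStep s) (List.replicate s.length 1)).length = s.length ∧
    ∀ k, k < s.length →
      ((List.range' 1 m).foldl (aStep s) (List.replicate s.length 1)).getD k 0 =
        if k ≤ m then max (upRun s k) (downTo s m k) else 1 := by
  induction m with
  | zero =>
    refine ⟨by simp, fun k hk => ?_⟩
    rw [List.range'_zero, List.foldl_nil]
    have : (List.replicate s.length (1:Int)).getD k 0 = 1 := by
      simp [List.getD_eq_getElem?_getD, hk]
    rw [this]
    split
    · rename_i h
      have : k = 0 := by omega
      subst this
      rw [downTo_stop s 0 0 (by omega), upRun]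
      simp
    · rfl
  | succ m ih =>
    obtain ⟨hlen, hr⟩ := ih (by omega)
    have hmn : m + 1 < s.length := by omega
    rw [List.range'_concat, List.foldl_append, List.foldl_cons, List.foldl_nil]
    rw [show 1 + 1 * m = m + 1 by omega]
    rw [aStep]
    rw [show m + 1 - 1 = m by omega]
    by_cases hc : s.getD (m+1) 0 > s.getD m 0
    · rw [if_pos hc]
      have hbr : ¬ s.getD m 0 > s.getD (m+1) 0 := by omega
      refine ⟨by rw [List.length_set]; exact hlen, fun k hk => ?_⟩
      by_cases hkm : k = m + 1
      · subst hkm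
        rw [getD_set_self _ _ _ (by omega)]
        have e1 : _ = _ := hr m (by omega)
        rw [if_pos (by omega : m ≤ m)] at e1
        have hdm : downTo s m m = 1 := downTo_stop s m m (by omega)
        have hup : upRun s (m+1) = upRun s m + 1 := by rw [upRun, if_pos hc]
        have hd1 : downTo s (m+1) (m+1) = 1 := downTo_stop s (m+1) (m+1) (by omega)
        have h1 : 1 ≤ upRun s m := one_le_upRun s m
        rw [e1, if_pos (le_refl _), hup, hdm, hd1]
        omega
      · rw [getD_set_ne _ _ _ _ (fun h => hkm h.symm)]
        have := hr k hk
        by_cases hkm2 : k ≤ m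
        · have heq : downTo s m k = downTo s (m+1) k :=
            downTo_break s m hbr (m - k) k hkm2 (le_refl _) m (m+1) (le_refl _) (by omega)
          rw [if_pos hkm2] at this
          rw [this, heq, if_pos (by omega : k ≤ m+1)]
        · rw [if_neg hkm2] at this
          rw [this, if_neg (by omega : ¬ k ≤ m+1)]
    · rw [if_neg hc]
      have hres := aInner_inv s (m+1) hmn (m+1) _ (le_refl _) hlen ?_
      · exact hres
      · intro k hk
        have := hr k hk
        rw [show m + 1 - 1 = m by omega]
        by_cases hkm : k < m + 1
        · rw [if_pos (by omega : k ≤ m)] at this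
          rw [this, if_pos hkm]
        · rw [if_neg (by omega : ¬ k ≤ m)] at this
          rw [this, if_neg hkm]
          by_cases hkm1 : k = m + 1
          · subst hkm1
            have hup : upRun s (m+1) = 1 := by rw [upRun, if_neg hc]
            have hd1 : downTo s (m+1) (m+1) = 1 := downTo_stop s (m+1) (m+1) (by omega)
            rw [if_pos (le_refl _), hup, hd1]
            simp
          · rw [if_neg (by omega : ¬ k ≤ m+1)]

-- invariant of B's first (left-to-right) pass
lemma bUp_inv (s : List Int) (m : Nat) (hm : m ≤ s.length - 1) :
    ((List.range' 1 m).foldl (bUpStep s) (List.replicate s.length 1)).length = s.length ∧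
    ∀ k, k < s.length →
      ((List.range' 1 m).foldl (bUpStep s) (List.replicate s.length 1)).getD k 0 =
        if k ≤ m then upRun s k else 1 := by
  induction m with
  | zero =>
    refine ⟨by simp, fun k hk => ?_⟩
    rw [List.range'_zero, List.foldl_nil]
    have : (List.replicate s.length (1:Int)).getD k 0 = 1 := by
      simp [List.getD_eq_getElem?_getD, hk]
    rw [this]
    split
    · rename_i h
      have : k = 0 := by omega
      subst this
      rw [upRun]
    · rfl
  | succ m ih =>
    obtain ⟨hlen, hr⟩ := ih (by omega)
    have hmn : m + 1 < s.length := by omega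
    rw [List.range'_concat, List.foldl_append, List.foldl_cons, List.foldl_nil]
    rw [show 1 + 1 * m = m + 1 by omega]
    rw [bUpStep]
    rw [show m + 1 - 1 = m by omega]
    by_cases hc : s.getD (m+1) 0 > s.getD m 0
    · rw [if_pos hc]
      refine ⟨by rw [List.length_set]; exact hlen, fun k hk => ?_⟩
      by_cases hkm : k = m + 1
      · subst hkm
        rw [getD_set_self _ _ _ (by omega)]
        have e1 := hr m (by omega)
        rw [if_pos (by omega : m ≤ m)] at e1
        rw [e1, if_pos (le_refl _), upRun, if_pos hc]
      · rw [getD_set_ne _ _ _ _ (fun h => hkm h.symm)]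
        have := hr k hk
        by_cases hkm2 : k ≤ m
        · rw [if_pos hkm2] at this; rw [this, if_pos (by omega : k ≤ m+1)]
        · rw [if_neg hkm2] at this; rw [this, if_neg (by omega : ¬ k ≤ m+1)]
    · rw [if_neg hc]
      refine ⟨hlen, fun k hk => ?_⟩
      have := hr k hk
      by_cases hkm2 : k ≤ m
      · rw [if_pos hkm2] at this; rw [this, if_pos (by omega : k ≤ m+1)]
      · rw [if_neg hkm2] at this
        by_cases hkm1 : k = m + 1
        · subst hkm1
          rw [this, if_pos (le_refl _), upRun, if_neg hc]
        · rw [this, if_neg (by omega : ¬ k ≤ m+1)]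

-- invariant of B's second (right-to-left) pass
lemma bDown_inv (s : List Int) :
    ∀ t, t ≤ s.length - 1 → ∀ r, r.length = s.length →
    (∀ k, k < s.length → r.getD k 0 =
      if k < t then upRun s k else max (upRun s k) (downTo s (s.length - 1) k)) →
    (((List.range t).reverse).foldl (bDownStep s) r).length = s.length ∧
    ∀ k, k < s.length →
      (((List.range t).reverse).foldl (bDownStep s) r).getD k 0 =
        max (upRun s k) (downTo s (s.length - 1) k) := by
  intro t
  induction t with
  | zero =>
    intro _ r hlen hr
    refine ⟨by simpa using hlen, fun k hk => ?_⟩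
    have := hr k hk
    simpa using this
  | succ t ih =>
    intro ht r hlen hr
    have htn : t + 1 < s.length := by omega
    rw [List.range_succ, List.reverse_append, List.reverse_singleton, List.singleton_append,
      List.foldl_cons]
    apply ih (by omega)
    · rw [bDownStep]
      split
      · rw [List.length_set]; exact hlen
      · exact hlen
    · intro k hk
      rw [bDownStep]
      by_cases hc : s.getD t 0 > s.getD (t+1) 0
      · rw [if_pos hc]
        by_cases hkt : k = t
        · subst hkt
          rw [getD_set_self _ _ _ (by omega)]
          have e1 := hr k hk
          rw [if_pos (by omega : k < k+1)] at e1
          have e2 := hr (k+1) (by omega)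
          rw [if_neg (by omega : ¬ k+1 < k+1)] at e2
          have hup1 : upRun s (k+1) = 1 := by rw [upRun, if_neg (by omega)]
          have hstep : downTo s (s.length - 1) k = downTo s (s.length - 1) (k+1) + 1 :=
            downTo_step s _ k (by omega) hc
          have hd1 : 1 ≤ downTo s (s.length - 1) (k+1) := one_le_downTo s _ _
          rw [e1, e2, hup1, if_neg (by omega : ¬ k < k)]
          omega
        · rw [getD_set_ne _ _ _ _ (fun h => hkt h.symm)]
          have := hr k hk
          by_cases hkt2 : k < t
          · rw [if_pos (by omega : k < t+1)] at this; rw [this, if_pos hkt2]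
          · rw [if_neg (by omega : ¬ k < t+1)] at this; rw [this, if_neg hkt2]
      · rw [if_neg hc]
        have := hr k hk
        by_cases hkt : k = t
        · subst hkt
          rw [if_pos (by omega : k < k+1)] at this
          have hd1 : downTo s (s.length - 1) k = 1 :=
            downTo_stop s _ k (fun h => hc h.2)
          have h1 : 1 ≤ upRun s k := one_le_upRun s k
          rw [this, if_neg (by omega : ¬ k < k), hd1]
          omega
        · by_cases hkt2 : k < t
          · rw [if_pos (by omega : k < t+1)] at this; rw [this, if_pos hkt2]
          · rw [if_neg (by omega : ¬ k < t+1)] at this; rw [this, if_neg hkt2]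

-- ===== VERDICT (by name: the statement is the Claim_ definition above) =====
theorem minRewards_spec : Claim_equal_minRewards := by
  intro score _
  unfold Spec_minRewards minRewards minRewards_alt
  obtain ⟨la, ha⟩ := aLoop_inv score (score.length - 1) (le_refl _)
  obtain ⟨l1, h1⟩ := bUp_inv score (score.length - 1) (le_refl _)
  have hpre : ∀ k, k < score.length →
      ((List.range' 1 (score.length - 1)).foldl (bUpStep score)
        (List.replicate score.length 1)).getD k 0 =
      if k < score.length - 1 then upRun score k
      else max (upRun score k) (downTo score (score.length - 1) k) := by
    intro k hk
    have hv := h1 k hk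
    rw [if_pos (by omega : k ≤ score.length - 1)] at hv
    rw [hv]
    by_cases hkn : k < score.length - 1
    · rw [if_pos hkn]
    · rw [if_neg hkn]
      have hd1 : downTo score (score.length - 1) k = 1 :=
        downTo_stop score _ k (fun h => hkn h.1)
      have h1' : 1 ≤ upRun score k := one_le_upRun score k
      rw [hd1]
      omega
  obtain ⟨l2, h2⟩ := bDown_inv score (score.length - 1) (le_refl _) _ l1 hpre
  congr 1
  apply List.ext_getElem (by rw [la, l2])
  intro i hi1 hi2
  have hi : i < score.length := by rwa [la] at hi1
  rw [← List.getD_eq_getElem _ 0 hi1, ← List.getD_eq_getElem _ 0 hi2]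
  rw [ha i hi, h2 i hi, if_pos (by omega : i ≤ score.length - 1)]
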